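-- pv_equiv track=rewrite | github.com/beautyhasnoshape/aoc2018 | python/day05.py | solve
-- ===== SOURCE A (Python) =====
-- def peek(stack):
--     return stack[-1]
--
-- def solve(txt):
--     stack = []
--     for ch in txt:
--         if len(stack) == 0 or ch != peek(stack).swapcase():
--             stack.append(ch)
--         else:
--             stack.pop()
--     return len(stack)
-- ===== SOURCE B (Python) =====
-- def solve(txt):
--     s = list(txt)
--     changed = True
--     while changed:
--         out = []
--         changed = False
--         i = 0
--         n = len(s)
--         while i < n:
--             if i + 1 < n and s[i + 1] == s[i].swapcase():
--                 i += 2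
--                 changed = True
--             else:
--                 out.append(s[i])
--                 i += 1
--         s = out
--     return len(s)
-- ===== Notes on version B (the rewrite author's own statement) =====
-- stated objective: alternative
-- what changed: Replaces the single left-to-right stack pass by whole-string reduction passes repeated to a fixed point: each pass removes every disjoint adjacent reacting pair, looping until no pass removes anything; by confluence of the reduction the final length is the same.
import Mathlib
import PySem

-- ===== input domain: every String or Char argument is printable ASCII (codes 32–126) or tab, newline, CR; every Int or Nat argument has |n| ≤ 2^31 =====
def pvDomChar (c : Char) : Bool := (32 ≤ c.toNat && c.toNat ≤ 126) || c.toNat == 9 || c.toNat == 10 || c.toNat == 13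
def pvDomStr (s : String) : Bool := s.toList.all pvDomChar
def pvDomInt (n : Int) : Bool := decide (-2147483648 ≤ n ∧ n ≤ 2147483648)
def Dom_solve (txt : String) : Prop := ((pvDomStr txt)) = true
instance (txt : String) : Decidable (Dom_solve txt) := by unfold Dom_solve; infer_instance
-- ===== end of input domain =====

-- B replaces the single left-to-right stack pass by whole-string reduction passes repeated
-- to a fixed point (alternative decomposition, same result by confluence; not faster).

-- str.swapcase() for one character, exact on the ASCII domain (both Pythons use it)
def swapc (c : Char) : Char :=
  if 97 ≤ c.toNat ∧ c.toNat ≤ 122 then Char.ofNat (c.toNat - 32)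
  else if 65 ≤ c.toNat ∧ c.toNat ≤ 90 then Char.ofNat (c.toNat + 32)
  else c

-- ===== PORT A =====
-- helper peek: stack[-1]
def peek (stack : List Char) : Option Char := PySem.List.pyGet? stack (-1)

def solve (txt : String) : Int :=
  let stack := txt.toList.foldl
    (fun stack ch =>
      if stack.length == 0 || ((peek stack).map swapc != some ch) then
        stack ++ [ch]
      else
        -- stack.pop(); the guard ensures the stack is nonempty, so pop? is some
        match PySem.List.pop? stack (-1) with
        | some (_, rest) => rest
        | none => stack) []
  (stack.length : Int)

-- ===== PORT B =====
-- one scan of the inner while loop: removes every disjoint adjacent reacting pair,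
-- returns the kept characters and the `changed` flag
def onePass : List Char → List Char × Bool
  | [] => ([], false)
  | [a] => ([a], false)
  | a :: b :: t =>
    if b = swapc a then ((onePass t).1, true)
    else (a :: (onePass (b :: t)).1, (onePass (b :: t)).2)

theorem onePass_le (l : List Char) : (onePass l).1.length ≤ l.length := by
  fun_induction onePass l <;> simp_all
  omega

theorem onePass_shrink (l : List Char) (h : (onePass l).2 = true) :
    (onePass l).1.length < l.length := by
  fun_induction onePass l with
  | case1 => simp at h
  | case2 a => simp at h
  | case3 a t ih =>
    have := onePass_le t
    show (onePass t).1.length < t.length + 1 + 1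
    omega
  | case4 a b t hb ih =>
    have h' : (onePass (b :: t)).2 = true := h
    have := ih h'
    show (a :: (onePass (b :: t)).1).length < (b :: t).length + 1
    simp only [List.length_cons] at *
    omega

-- the outer while loop: repeat whole passes until one removes nothing
def loopB (s : List Char) : List Char :=
  let p := onePass s
  if _h : p.2 then loopB p.1 else p.1
termination_by s.length
decreasing_by exact onePass_shrink s _h

def solve_alt (txt : String) : Int := ((loopB txt.toList).length : Int)

-- ===== PRECONDITION & SPEC =====
def Spec_solve (txt : String) (out : Int) : Prop := out = solve_alt txt
instance (txt : String) (out : Int) : Decidable (Spec_solve txt out) := by unfold Spec_solve; infer_instance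

-- ===== CLAIM (what is proved, stated in full; the proofs are below) =====
def Claim_equal_solve : Prop := ∀ (txt : String), Dom_solve txt → Spec_solve txt (solve txt)

-- ===== LEMMAS AND PROOFS =====

theorem char_toNat_ofNat_small {n : Nat} (h : n < 55296) : (Char.ofNat n).toNat = n := by
  rw [Char.toNat_ofNat, if_pos (Or.inl h)]

theorem swapc_swapc (c : Char) : swapc (swapc c) = c := by
  unfold swapc
  by_cases h1 : 97 ≤ c.toNat ∧ c.toNat ≤ 122
  · have ht : (Char.ofNat (c.toNat - 32)).toNat = c.toNat - 32 :=
      char_toNat_ofNat_small (by omega)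
    rw [if_pos h1, if_neg (by rw [ht]; omega), if_pos (by rw [ht]; omega), ht]
    have he : c.toNat - 32 + 32 = c.toNat := by omega
    rw [he, Char.ofNat_toNat]
  · by_cases h2 : 65 ≤ c.toNat ∧ c.toNat ≤ 90
    · have ht : (Char.ofNat (c.toNat + 32)).toNat = c.toNat + 32 :=
        char_toNat_ofNat_small (by omega)
      rw [if_neg h1, if_pos h2, if_pos (by rw [ht]; omega), ht]
      have he : c.toNat + 32 - 32 = c.toNat := by omega
      rw [he, Char.ofNat_toNat]
    · rw [if_neg h1, if_neg h2, if_neg h1, if_neg h2]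

theorem swapc_symm {a b : Char} (h : b = swapc a) : a = swapc b := by
  subst h; exact (swapc_swapc a).symm

-- front-top model of A's stack, and the normal form computed right to left
def push (c : Char) : List Char → List Char
  | [] => [c]
  | h :: t => if c = swapc h then t else c :: h :: t

def nf (l : List Char) : List Char := l.foldr push []

def ffold (s l : List Char) : List Char := l.foldl (fun st c => push c st) s

-- no adjacent reacting pair
def Red : List Char → Prop
  | [] => True
  | [_] => True
  | a :: b :: t => b ≠ swapc a ∧ Red (b :: t)

theorem red_cons {a : Char} {t : List Char} (h : Red (a :: t)) : Red t := by
  cases t with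
  | nil => trivial
  | cons b t' => exact h.2

theorem red_head {a b : Char} {t : List Char} (h : Red (a :: b :: t)) : b ≠ swapc a := h.1

theorem push_red {s : List Char} (hs : Red s) (c : Char) : Red (push c s) := by
  cases s with
  | nil => trivial
  | cons h t =>
    simp only [push]
    split_ifs with hc
    · exact red_cons hs
    · exact ⟨fun hh => hc (swapc_symm hh), hs⟩

theorem nf_red (l : List Char) : Red (nf l) := by
  induction l with
  | nil => trivial
  | cons a l ih => exact push_red ih a

theorem push_nonreact (h : Char) {s : List Char}
    (hint : ∀ y t, s = y :: t → h ≠ swapc y) : push h s = h :: s := by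
  cases s with
  | nil => rfl
  | cons b s' => exact if_neg (hint b s' rfl)

theorem nf_red_id {r : List Char} (hr : Red r) : nf r = r := by
  induction r with
  | nil => rfl
  | cons a t ih =>
    show push a (nf t) = a :: t
    rw [ih (red_cons hr)]
    refine push_nonreact a ?_
    rintro y t' rfl
    exact fun hy => red_head hr (swapc_symm hy)

theorem push_pair {a b : Char} (hb : b = swapc a) {r : List Char} (hr : Red r) :
    push a (push b r) = r := by
  cases r with
  | nil =>
    show push a [b] = []
    simp only [push]
    rw [if_pos (swapc_symm hb)]
  | cons h t' =>
    by_cases hbh : b = swapc h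
    · have hah : a = h := (swapc_symm hb).trans (swapc_symm hbh).symm
      have h1 : push b (h :: t') = t' := by simp only [push]; rw [if_pos hbh]
      rw [h1, hah]
      refine push_nonreact h ?_
      rintro y t'' rfl
      exact fun hy => red_head hr (swapc_symm hy)
    · have h1 : push b (h :: t') = b :: h :: t' := by simp only [push]; rw [if_neg hbh]
      have h2 : push a (b :: h :: t') = h :: t' := by simp only [push]; rw [if_pos (swapc_symm hb)]
      rw [h1, h2]

theorem ffold_push (a : Char) (r s : List Char) (hs : Red s) :
    ffold (push a s) r = ffold s (push a r) := by
  cases r with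
  | nil => rfl
  | cons h t =>
    by_cases hra : a = swapc h
    · have hp : push a (h :: t) = t := by simp only [push]; rw [if_pos hra]
      rw [hp]
      show ffold (push h (push a s)) t = ffold s t
      congr 1
      cases s with
      | nil =>
        show push h [a] = []
        simp only [push]
        rw [if_pos (swapc_symm hra)]
      | cons b s' =>
        by_cases hab : a = swapc b
        · have hps : push a (b :: s') = s' := by simp only [push]; rw [if_pos hab]
          have hhb : h = b :=
            (swapc_symm hra).trans ((congrArg swapc hab).trans (swapc_swapc b))
          rw [hps, hhb]
          refine push_nonreact b ?_
          rintro y t' rfl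
          exact fun hy => red_head hs (swapc_symm hy)
        · have hps : push a (b :: s') = a :: b :: s' := by
            simp only [push]; rw [if_neg hab]
          rw [hps]
          show (if h = swapc a then b :: s' else h :: a :: b :: s') = b :: s'
          rw [if_pos (swapc_symm hra)]
    · have hp : push a (h :: t) = a :: h :: t := by simp only [push]; rw [if_neg hra]
      rw [hp]
      rfl

theorem ffold_nf (l : List Char) : ∀ (s : List Char), Red s → ffold s l = ffold s (nf l) := by
  induction l with
  | nil => intro s _; rfl
  | cons a l ih =>
    intro s hs
    show ffold (push a s) l = ffold s (push a (nf l))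
    rw [ih (push a s) (push_red hs a), ffold_push a (nf l) s hs]

theorem ffold_red (r : List Char) (hr : Red r) : ∀ (s : List Char),
    (∀ x y t u, r = x :: t → s = y :: u → x ≠ swapc y) → ffold s r = r.reverse ++ s := by
  induction r with
  | nil => intro s _; simp [ffold]
  | cons h t ih =>
    intro s hint
    show ffold (push h s) t = (h :: t).reverse ++ s
    have hp : push h s = h :: s := by
      refine push_nonreact h ?_
      rintro y u rfl
      exact hint h y t u rfl rfl
    rw [hp, ih (red_cons hr) (h :: s) ?_]
    · simp
    · rintro x y u v rfl he
      cases he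
      exact fun hx => red_head hr hx

theorem nf_onePass (l : List Char) : nf (onePass l).1 = nf l := by
  fun_induction onePass l with
  | case1 => rfl
  | case2 a => rfl
  | case3 a t ih =>
    show nf (onePass t).1 = push a (push (swapc a) (nf t))
    rw [push_pair rfl (nf_red t), ih]
  | case4 a b t hb ih =>
    show push a (nf (onePass (b :: t)).1) = push a (nf (b :: t))
    rw [ih]

theorem onePass_fix (l : List Char) (h : (onePass l).2 = false) :
    (onePass l).1 = l ∧ Red l := by
  fun_induction onePass l with
  | case1 => exact ⟨rfl, trivial⟩
  | case2 a => exact ⟨rfl, trivial⟩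
  | case3 a t ih => simp at h
  | case4 a b t hb ih =>
    have h' : (onePass (b :: t)).2 = false := h
    obtain ⟨he, hred⟩ := ih h'
    exact ⟨by rw [he], ⟨hb, hred⟩⟩

theorem loopB_eq_nf (s : List Char) : loopB s = nf s := by
  fun_induction loopB s with
  | case1 s p hp ih => rw [ih, nf_onePass]
  | case2 s p hp =>
    have hfix := onePass_fix s (by simpa using hp)
    rw [hfix.1, nf_red_id hfix.2]

theorem stepA_eq (st : List Char) (ch : Char) :
    (if (st.length == 0 || ((peek st).map swapc != some ch)) = true then
        st ++ [ch]
      else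
        match PySem.List.pop? st (-1) with
        | some (_, rest) => rest
        | none => st) = (push ch st.reverse).reverse := by
  rcases List.eq_nil_or_concat st with rfl | ⟨ys, y, rfl⟩
  · rfl
  · simp only [List.concat_eq_append]
    have hpk : peek (ys ++ [y]) = some y := PySem.List.pyGet?_neg_one_append_singleton ys y
    have hpop : PySem.List.pop? (ys ++ [y]) (-1) = some (y, ys) := PySem.List.pop?_last ys y
    have hrev : (ys ++ [y]).reverse = y :: ys.reverse := by simp
    rw [hrev]
    simp only [push]
    by_cases hc : ch = swapc y
    · rw [if_pos hc]
      have hcond : ((ys ++ [y]).length == 0 || ((peek (ys ++ [y])).map swapc != some ch)) = false := by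
        rw [hpk]; simp [hc]
      rw [hcond]
      simp [hpop]
    · rw [if_neg hc]
      have hcond : ((ys ++ [y]).length == 0 || ((peek (ys ++ [y])).map swapc != some ch)) = true := by
        rw [hpk]
        simp only [Option.map_some, Bool.or_eq_true, bne_iff_ne, ne_eq, Option.some.injEq]
        exact Or.inr fun hh => hc hh.symm
      rw [hcond]
      simp

theorem foldA_rev (l : List Char) : ∀ (st : List Char),
    l.foldl (fun stack ch =>
      if stack.length == 0 || ((peek stack).map swapc != some ch) then
        stack ++ [ch]
      else
        match PySem.List.pop? stack (-1) with
        | some (_, rest) => rest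
        | none => stack) st = (ffold st.reverse l).reverse := by
  induction l with
  | nil => intro st; simp [ffold]
  | cons a l ih =>
    intro st
    rw [List.foldl_cons, stepA_eq st a, ih ((push a st.reverse).reverse)]
    show (ffold (push a st.reverse).reverse.reverse l).reverse = (ffold st.reverse (a :: l)).reverse
    rw [List.reverse_reverse]
    rfl

theorem solve_eq_nf (txt : String) : solve txt = ((nf txt.toList).length : Int) := by
  unfold solve
  rw [foldA_rev txt.toList []]
  show (((ffold [] txt.toList).reverse.length : Nat) : Int) = _
  rw [List.length_reverse, ffold_nf txt.toList [] trivial,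
    ffold_red (nf txt.toList) (nf_red txt.toList) []
      (by intro x y t u _ he; simp at he)]
  simp

-- ===== VERDICT (by name: the statement is the Claim_ definition above) =====
theorem solve_spec : Claim_equal_solve := by
  intro txt _
  unfold Spec_solve solve_alt
  rw [solve_eq_nf, loopB_eq_nf]
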